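-- pv_equiv track=rewrite | github.com/ramanamurthy-bure/PythonCore | pythonBasics/26_FunctionsPracticeProbs_3.py | summer1_69
-- ===== SOURCE A (Python) =====
-- def summer1_69(mylist):
--     total = 0
--     add = True
--     for num in mylist:
--         while add:
--             if num != 6:
--                 total += num
--                 break
--             else:
--                 add = False
--         while not add:
--             if num != 9:
--                 break
--             else:
--                 add = True
--                 break
--     return total
-- ===== SOURCE B (Python) =====
-- def summer1_69(mylist):
--     # Two-level traversal over one shared iterator: the inner loop consumes
--     # the 6..9 span, replacing A's cross-iteration boolean state machine.
--     total = 0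
--     it = iter(mylist)
--     for num in it:
--         if num != 6:
--             total += num
--         else:
--             for n2 in it:
--                 if n2 == 9:
--                     break
--     return total
-- ===== Notes on version B (the rewrite author's own statement) =====
-- stated objective: idiomatic
-- what changed: Replaces A's per-element boolean state machine (two while loops flipping an 'add' flag across iterations) with a two-level traversal of one shared iterator whose inner loop consumes the 6..9 span.
import Mathlib
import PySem

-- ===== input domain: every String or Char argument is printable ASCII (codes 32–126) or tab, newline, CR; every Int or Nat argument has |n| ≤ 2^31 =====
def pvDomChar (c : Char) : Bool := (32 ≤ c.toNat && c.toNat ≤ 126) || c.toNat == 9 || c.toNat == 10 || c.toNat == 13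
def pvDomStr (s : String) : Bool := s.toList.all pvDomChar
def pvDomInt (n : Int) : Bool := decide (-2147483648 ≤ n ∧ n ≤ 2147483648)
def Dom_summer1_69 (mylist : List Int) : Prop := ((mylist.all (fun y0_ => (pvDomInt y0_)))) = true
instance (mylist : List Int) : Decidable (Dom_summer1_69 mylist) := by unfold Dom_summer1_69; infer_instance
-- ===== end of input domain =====

-- B replaces A's cross-iteration boolean state machine with a two-level traversal
-- whose inner recursion consumes the 6..9 span (objective: idiomatic).

-- ===== PORT A =====
-- Per-element body of A's for-loop: each while loop runs at most one effective
-- iteration (both exit via break or by flipping `add`), transcribed branch for branch.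
def stepA (s : Int × Bool) (num : Int) : Int × Bool :=
  let (total, add) := s
  -- while add: if num != 6 then total += num; break else add = False (loop then exits)
  let (total, add) := if add then (if num ≠ 6 then (total + num, add) else (total, false)) else (total, add)
  -- while not add: if num != 9 then break else add = True; break
  let add := if ¬ add then (if num ≠ 9 then add else true) else add
  (total, add)

def summer1_69 (mylist : List Int) : Int :=
  (mylist.foldl stepA (0, true)).1

-- ===== PORT B =====
-- `sumB` is B's outer loop over the shared iterator; `skipB` is the inner loop
-- that advances the same iterator until it finds a 9.
mutual
def sumB : List Int → Int
  | [] => 0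
  | num :: rest => if num ≠ 6 then num + sumB rest else skipB rest
def skipB : List Int → Int
  | [] => 0
  | n2 :: rest => if n2 = 9 then sumB rest else skipB rest
end

def summer1_69_alt (mylist : List Int) : Int := sumB mylist

-- ===== PRECONDITION & SPEC =====
def Spec_summer1_69 (mylist : List Int) (out : Int) : Prop := out = summer1_69_alt mylist
instance (mylist : List Int) (out : Int) : Decidable (Spec_summer1_69 mylist out) := by unfold Spec_summer1_69; infer_instance

-- ===== CLAIM (what is proved, stated in full; the proofs are below) =====
def Claim_equal_summer1_69 : Prop := ∀ (mylist : List Int), Dom_summer1_69 mylist → Spec_summer1_69 mylist (summer1_69 mylist)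

-- ===== LEMMAS AND PROOFS =====

theorem foldl_stepA (l : List Int) : ∀ t : Int,
    (l.foldl stepA (t, true)).1 = t + sumB l ∧ (l.foldl stepA (t, false)).1 = t + skipB l := by
  induction l with
  | nil => intro t; simp [sumB, skipB]
  | cons x xs ih =>
    intro t
    constructor
    · by_cases hx : x = 6
      · simpa [List.foldl, stepA, hx, sumB] using (ih t).2
      · have := (ih (t + x)).1
        simp [List.foldl, stepA, hx, sumB]
        omega
    · by_cases hx : x = 9
      · simpa [List.foldl, stepA, hx, skipB] using (ih t).1
      · simpa [List.foldl, stepA, hx, skipB] using (ih t).2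

-- ===== VERDICT (by name: the statement is the Claim_ definition above) =====
theorem summer1_69_spec : Claim_equal_summer1_69 := by
  intro l _
  unfold Spec_summer1_69 summer1_69 summer1_69_alt
  have := (foldl_stepA l 0).1
  omega
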